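-- pv_equiv track=rewrite | github.com/Malachoris/Super_tiktaktoe | Board.py | input_value_converter
-- ===== SOURCE A (Python) =====
-- def input_value_converter(list_of_values: list):
-- 	numeric_values = []
--
-- 	for value in list_of_values:
-- 		if value == "x":
-- 			numeric_values.append(1)
-- 		elif value == "o":
-- 			numeric_values.append(-1)
-- 		else:
-- 			numeric_values.append(0)
--
-- 	return abs(sum(numeric_values)) == 3
-- ===== SOURCE B (Python) =====
-- def input_value_converter(list_of_values: list):
--     return abs(list_of_values.count("x") - list_of_values.count("o")) == 3
-- ===== Notes on version B (the rewrite author's own statement) =====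
-- stated objective: simpler
-- what changed: B drops the intermediate numeric list and the accumulating loop entirely, computing the net balance as a one-line difference of two count() scans.
import Mathlib
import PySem

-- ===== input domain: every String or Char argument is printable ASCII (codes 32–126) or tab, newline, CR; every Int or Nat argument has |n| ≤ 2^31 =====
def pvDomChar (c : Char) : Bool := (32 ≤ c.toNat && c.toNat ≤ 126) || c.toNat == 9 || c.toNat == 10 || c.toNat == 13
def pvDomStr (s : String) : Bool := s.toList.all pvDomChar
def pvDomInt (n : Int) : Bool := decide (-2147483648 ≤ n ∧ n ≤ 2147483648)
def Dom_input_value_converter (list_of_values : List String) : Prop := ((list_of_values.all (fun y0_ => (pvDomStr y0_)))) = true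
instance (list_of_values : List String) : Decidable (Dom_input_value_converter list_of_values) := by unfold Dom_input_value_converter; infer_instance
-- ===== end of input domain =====

-- B replaces A's accumulating map-to-numbers loop by a one-line difference of two count scans (objective: simpler).


-- ===== PORT A =====
def input_value_converter (list_of_values : List String) : Bool :=
  let numeric_values : List Int :=
    list_of_values.foldl (fun acc value =>
      if value == "x" then acc ++ [(1 : Int)]
      else if value == "o" then acc ++ [(-1 : Int)]
      else acc ++ [(0 : Int)]) []
  |numeric_values.foldl (· + ·) 0| == 3

-- ===== PORT B =====
def input_value_converter_alt (list_of_values : List String) : Bool :=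
  |(PySem.List.count list_of_values "x" : Int) - (PySem.List.count list_of_values "o" : Int)| == 3

-- ===== PRECONDITION & SPEC =====
def Spec_input_value_converter (list_of_values : List String) (out : Bool) : Prop := out = input_value_converter_alt list_of_values
instance (list_of_values : List String) (out : Bool) : Decidable (Spec_input_value_converter list_of_values out) := by unfold Spec_input_value_converter; infer_instance

-- ===== CLAIM (what is proved, stated in full; the proofs are below) =====
def Claim_equal_input_value_converter : Prop := ∀ (list_of_values : List String), Dom_input_value_converter list_of_values → Spec_input_value_converter list_of_values (input_value_converter list_of_values)

-- ===== LEMMAS AND PROOFS =====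

-- ===== VERDICT (by name: the statement is the Claim_ definition above) =====

theorem ivc_sum_eq (l : List String) (acc : List Int) :
    (l.foldl (fun acc value =>
      if value == "x" then acc ++ [(1 : Int)]
      else if value == "o" then acc ++ [(-1 : Int)]
      else acc ++ [(0 : Int)]) acc).foldl (· + ·) 0
    = acc.foldl (· + ·) 0 + ((PySem.List.count l "x" : Int) - (PySem.List.count l "o" : Int)) := by
  induction l generalizing acc with
  | nil => simp [PySem.List.count]
  | cons h t ih =>
    rw [List.foldl_cons, ih]
    simp only [PySem.List.count, List.count_cons]
    by_cases hx : h = "x"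
    · subst hx
      simp only [if_pos, beq_self_eq_true, List.foldl_append, List.foldl_cons,
        List.foldl_nil]
      push_cast
      ring
    · by_cases ho : h = "o"
      · subst ho
        simp only [beq_iff_eq, hx, if_false, beq_self_eq_true, if_true, List.foldl_append,
          List.foldl_cons, List.foldl_nil]
        push_cast
        ring
      · simp only [beq_iff_eq, hx, ho, if_false, List.foldl_append, List.foldl_cons,
          List.foldl_nil]
        push_cast
        ring

theorem input_value_converter_spec : Claim_equal_input_value_converter := by
  intro l _
  unfold Spec_input_value_converter
  simp only [input_value_converter, input_value_converter_alt, ivc_sum_eq]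
  simp
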